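-- pv_equiv track=rewrite | github.com/pawlowiczf/WDI-2023 | WDI zestaw 2/5 podzielne 7, wykreślenie.py | nowa_liczba
-- ===== SOURCE A (Python) =====
-- def nowa_liczba(n, mask):
--     i = liczba = 0
--
--     while n>0:
--         if mask % 2 == 0:
--             pass
--         else:
--             liczba += ( n%10 ) * (10**i)
--             i = i+1
--         #end if
--         mask = mask // 2
--         n = n // 10
--     #end while
--     return liczba
-- ===== SOURCE B (Python) =====
-- def nowa_liczba(n, mask):
--     # Recursive MSB-first Horner composition: the compressed number of the higher
--     # digits is shifted left one decimal place whenever the current low bit of the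
--     # mask keeps the current low digit.  No powers of 10 and no index counter.
--     if n <= 0:
--         return 0
--     rest = nowa_liczba(n // 10, mask // 2)
--     if mask % 2 != 0:
--         return rest * 10 + n % 10
--     return rest
-- ===== Notes on version B (the rewrite author's own statement) =====
-- stated objective: simpler
-- what changed: Replaces the iterative LSB place-value accumulation (running index i and 10**i powers) by a structural recursion that composes the result Horner-style (rest*10 + digit), eliminating the power computation and both accumulators.
import Mathlib
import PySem

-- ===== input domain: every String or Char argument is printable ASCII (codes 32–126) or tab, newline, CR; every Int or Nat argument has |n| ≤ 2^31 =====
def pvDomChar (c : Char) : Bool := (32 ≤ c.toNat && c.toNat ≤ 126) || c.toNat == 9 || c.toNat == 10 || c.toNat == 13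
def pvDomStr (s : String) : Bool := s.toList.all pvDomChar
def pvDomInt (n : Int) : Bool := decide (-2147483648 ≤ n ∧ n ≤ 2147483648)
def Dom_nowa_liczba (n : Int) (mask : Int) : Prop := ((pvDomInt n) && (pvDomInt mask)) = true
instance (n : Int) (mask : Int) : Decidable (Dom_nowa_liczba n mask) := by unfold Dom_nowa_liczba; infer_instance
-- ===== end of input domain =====

-- B replaces A's iterative LSB place-value accumulation (index i, 10**i powers) by a
-- structural recursion composing the result Horner-style (rest*10 + digit): simpler.

-- termination helper: n // 10 shrinks when 0 < n (cited by decreasing_by below)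
theorem pv_floordiv10_lt (n : Int) (h : 0 < n) :
    (PySem.Int.floordiv n 10).toNat < n.toNat := by
  rw [PySem.Int.floordiv_eq_ediv_of_pos (by omega)]
  omega

-- ===== PORT A =====
-- the while loop as a recursive helper over the same state (i stays ≥ 0 throughout,
-- so it is carried as a Nat and 10**i is 10 ^ i — exact for Python's run)
def nowa_liczba_go (n mask : Int) (i : Nat) (liczba : Int) : Int :=
  if h : n > 0 then
    if PySem.Int.mod mask 2 == 0 then
      nowa_liczba_go (PySem.Int.floordiv n 10) (PySem.Int.floordiv mask 2) i liczba
    else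
      nowa_liczba_go (PySem.Int.floordiv n 10) (PySem.Int.floordiv mask 2) (i + 1)
        (liczba + (PySem.Int.mod n 10) * 10 ^ i)
  else liczba
termination_by n.toNat
decreasing_by all_goals exact pv_floordiv10_lt n h

def nowa_liczba (n : Int) (mask : Int) : Int := nowa_liczba_go n mask 0 0

-- ===== PORT B =====
def nowa_liczba_alt (n : Int) (mask : Int) : Int :=
  if h : n ≤ 0 then 0
  else
    let rest := nowa_liczba_alt (PySem.Int.floordiv n 10) (PySem.Int.floordiv mask 2)
    if PySem.Int.mod mask 2 ≠ 0 then rest * 10 + PySem.Int.mod n 10 else rest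
termination_by n.toNat
decreasing_by exact pv_floordiv10_lt n (by omega)

-- ===== PRECONDITION & SPEC =====
def Spec_nowa_liczba (n : Int) (mask : Int) (out : Int) : Prop := out = nowa_liczba_alt n mask
instance (n : Int) (mask : Int) (out : Int) : Decidable (Spec_nowa_liczba n mask out) := by unfold Spec_nowa_liczba; infer_instance

-- ===== CLAIM (what is proved, stated in full; the proofs are below) =====
def Claim_equal_nowa_liczba : Prop := ∀ (n : Int) (mask : Int), Dom_nowa_liczba n mask → Spec_nowa_liczba n mask (nowa_liczba n mask)

-- ===== LEMMAS AND PROOFS =====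

-- loop invariant: A's loop from state (n, mask, i, liczba) returns liczba plus B's
-- compressed number of (n, mask) shifted i decimal places
theorem pv_go_eq (k : Nat) : ∀ (n mask : Int) (i : Nat) (liczba : Int), n.toNat ≤ k →
    nowa_liczba_go n mask i liczba = liczba + nowa_liczba_alt n mask * 10 ^ i := by
  induction k with
  | zero =>
    intro n mask i liczba hk
    have hn : ¬ n > 0 := by omega
    rw [nowa_liczba_go, nowa_liczba_alt]
    simp [hn, show n ≤ 0 by omega]
  | succ k ih =>
    intro n mask i liczba hk
    by_cases hn : n > 0
    · have hlt : (PySem.Int.floordiv n 10).toNat ≤ k := by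
        have := pv_floordiv10_lt n hn; omega
      rw [nowa_liczba_go, nowa_liczba_alt]
      simp only [hn, dif_pos, show ¬ n ≤ 0 by omega, dif_neg, not_false_iff]
      by_cases hm : PySem.Int.mod mask 2 = 0
      · simp only [hm, beq_self_eq_true, if_pos, ne_eq, not_true_eq_false, if_false]
        exact ih _ _ _ _ hlt
      · simp only [ne_eq, hm, not_false_eq_true, if_true,
          show (PySem.Int.mod mask 2 == 0) = false by simpa using hm, Bool.false_eq_true,
          if_false]
        rw [ih _ _ _ _ hlt]
        ring
    · rw [nowa_liczba_go, nowa_liczba_alt]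
      simp [hn, show n ≤ 0 by omega]

-- ===== VERDICT (by name: the statement is the Claim_ definition above) =====
theorem nowa_liczba_spec : Claim_equal_nowa_liczba := by
  intro n mask _
  unfold Spec_nowa_liczba nowa_liczba
  rw [pv_go_eq n.toNat n mask 0 0 le_rfl]
  ring
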